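-- pv_equiv track=rewrite | github.com/shi0524/algorithmbasic2020 | Python2/class24/Code02_AllLessNumSubArray.py | sub_arr_num
-- ===== SOURCE A (Python) =====
-- from collections import deque
--
-- def sub_arr_num(arr, num):
--     """
--     滑动窗口 + 贪心
--     小贪心:
--         一个窗口的最大(小)值不会随着窗口的扩大而变小(大), 只可能越来越大(小)
--         一个窗口的最大(小)值不会随着窗口的缩小而变大(小), 只可能越来越小(大)
--     思路:
--         如果一个子数组达标，那么该子数组的子数组也达标
--         计算以L开头的数组
--         窗口R扩到不能再扩(如果窗口左闭右开)
--         则以L开头的数组个数为 R - L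
--     """
--     if not arr or num < 0:
--         return 0
--     n = len(arr)
--     ans = 0
--     max_window = deque()
--     min_window = deque()
--
--     # 窗口范围左闭右开 [L, R)
--     R = 0
--     for L in range(n):
--         # L ... R(初次不达标了, 停)
--         while R < n:
--             while max_window and arr[max_window[-1]] <= arr[R]:
--                 max_window.pop()
--             max_window.append(R)
--             while min_window and arr[min_window[-1]] >= arr[R]:
--                 min_window.pop()
--             min_window.append(R)
--             if arr[max_window[0]] - arr[min_window[0]] > num:
--                 break
--             R += 1
--         ans += (R - L)
--         # L 马上要 +1 了, 检查窗口最大值最小值是否过期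
--         if max_window[0] == L:
--             max_window.popleft()
--         if min_window[0] == L:
--             min_window.popleft()
--     return ans
-- ===== SOURCE B (Python) =====
-- def sub_arr_num(arr, num):
--     total = 0
--     n = len(arr)
--     for l in range(n):
--         lo = arr[l]
--         hi = arr[l]
--         r = l
--         while r < n:
--             v = arr[r]
--             if v < lo:
--                 lo = v
--             if v > hi:
--                 hi = v
--             if hi - lo > num:
--                 break
--             r += 1
--         total += r - l
--     return total
-- ===== Notes on version B (the rewrite author's own statement) =====
-- stated objective: simpler
-- what changed: Replaces the sliding window with two monotone index deques by a per-start forward scan that keeps only the running min and max of the window.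
import Mathlib
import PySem

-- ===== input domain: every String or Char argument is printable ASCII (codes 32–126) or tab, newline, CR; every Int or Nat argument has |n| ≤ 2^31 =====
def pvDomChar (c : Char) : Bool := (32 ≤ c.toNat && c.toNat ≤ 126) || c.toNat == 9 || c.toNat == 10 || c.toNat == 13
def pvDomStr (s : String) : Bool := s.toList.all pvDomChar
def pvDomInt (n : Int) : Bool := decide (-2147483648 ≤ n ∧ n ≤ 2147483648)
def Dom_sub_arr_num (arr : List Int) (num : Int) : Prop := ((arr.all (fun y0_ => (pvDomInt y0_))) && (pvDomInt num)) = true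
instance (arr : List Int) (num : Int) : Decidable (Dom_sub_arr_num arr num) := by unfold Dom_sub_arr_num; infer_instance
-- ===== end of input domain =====

-- B replaces A's monotone index deques by a per-start forward scan keeping only the running min/max (simpler, no deques).

-- ===== PORT A =====
-- arr[i]; every index reached by either program lies in [0, len arr), where getD is exact
def aget (arr : List Int) (i : ℕ) : Int := arr.getD i 0

-- 'while d and arr[d[-1]] <= arr[R]: d.pop()' : drop the maximal suffix whose entries satisfy p
def popBackWhile (p : ℕ → Bool) : List ℕ → List ℕ
  | [] => []
  | x :: xs =>
    match popBackWhile p xs with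
    | [] => if p x then [] else [x]
    | y :: ys => x :: y :: ys

-- the inner 'while R < n' loop of A; fuel = n - R
def innerA (arr : List Int) (num : Int) (n : ℕ) : ℕ → ℕ → List ℕ → List ℕ → ℕ × List ℕ × List ℕ
  | 0, R, maxw, minw => (R, maxw, minw)
  | f+1, R, maxw, minw =>
    if R < n then
      let maxw' := popBackWhile (fun i => decide (aget arr i ≤ aget arr R)) maxw ++ [R]
      let minw' := popBackWhile (fun i => decide (aget arr i ≥ aget arr R)) minw ++ [R]
      if aget arr (maxw'.headD 0) - aget arr (minw'.headD 0) > num then (R, maxw', minw')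
      else innerA arr num n f (R+1) maxw' minw'
    else (R, maxw, minw)

-- one iteration of A's 'for L in range(n)' loop (deques are provably nonempty at the popleft test)
def stepA (arr : List Int) (num : Int) (n : ℕ) (st : ℕ × Int × List ℕ × List ℕ) (L : ℕ) :
    ℕ × Int × List ℕ × List ℕ :=
  let t := innerA arr num n (n - st.1) st.1 st.2.2.1 st.2.2.2
  (t.1, st.2.1 + ((t.1 : Int) - (L : Int)),
   (if t.2.1.headD 0 = L then t.2.1.tail else t.2.1),
   (if t.2.2.headD 0 = L then t.2.2.tail else t.2.2))

def sub_arr_num (arr : List Int) (num : Int) : Int :=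
  if arr = [] ∨ num < 0 then 0
  else ((List.range arr.length).foldl (stepA arr num arr.length) (0, 0, [], [])).2.1

-- ===== PORT B =====
-- Source B's 'while r < n' scan with running lo/hi; fuel = n - r
def extB (arr : List Int) (num : Int) (n : ℕ) : ℕ → ℕ → Int → Int → ℕ
  | 0, r, _, _ => r
  | f+1, r, lo, hi =>
    if r < n then
      let v := aget arr r
      let lo' := if v < lo then v else lo
      let hi' := if v > hi then v else hi
      if hi' - lo' > num then r
      else extB arr num n f (r+1) lo' hi'
    else r

def sub_arr_num_alt (arr : List Int) (num : Int) : Int :=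
  (List.range arr.length).foldl
    (fun total l =>
      total + ((extB arr num arr.length (arr.length - l) l (aget arr l) (aget arr l) : Int) - (l : Int)))
    0

-- ===== PRECONDITION & SPEC =====
def Spec_sub_arr_num (arr : List Int) (num : Int) (out : Int) : Prop := out = sub_arr_num_alt arr num
instance (arr : List Int) (num : Int) (out : Int) : Decidable (Spec_sub_arr_num arr num out) := by unfold Spec_sub_arr_num; infer_instance

-- ===== CLAIM (what is proved, stated in full; the proofs are below) =====
def Claim_equal_sub_arr_num : Prop := ∀ (arr : List Int) (num : Int), Dom_sub_arr_num arr num → Spec_sub_arr_num arr num (sub_arr_num arr num)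

-- ===== LEMMAS AND PROOFS =====

-- max of a[l..l+k]
def maxK (a : ℕ → Int) (l : ℕ) : ℕ → Int
  | 0 => a l
  | k+1 => max (maxK a l k) (a (l+(k+1)))

def negf (a : ℕ → Int) : ℕ → Int := fun i => -(a i)

-- max of a[l..r] (meaningful for l ≤ r)
def mSeg (a : ℕ → Int) (l r : ℕ) : Int := maxK a l (r - l)

-- window [l..r] violates the bound:  max - min > num,  min = -(max of -a)
def badB (a : ℕ → Int) (num : Int) (l r : ℕ) : Bool :=
  decide (mSeg a l r + mSeg (negf a) l r > num)

-- first r' ≥ r (within fuel) with badB; both loops compute this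
def extGo (a : ℕ → Int) (num : Int) (l : ℕ) : ℕ → ℕ → ℕ
  | 0, r => r
  | f+1, r => if badB a num l r then r else extGo a num l f (r+1)

def extA (a : ℕ → Int) (num : Int) (n l : ℕ) : ℕ := extGo a num l (n - l) l

-- the monotone deque covering [l, e): indices dominating everything to their right
def dqD (a : ℕ → Int) (l e : ℕ) : List ℕ :=
  (List.range' l (e - l)).filter (fun i => decide (∀ j, j < e → i < j → a j < a i))

lemma maxK_shift (a : ℕ → Int) (l k : ℕ) :
    maxK a l (k+1) = max (a l) (maxK a (l+1) k) := by
  induction k with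
  | zero => simp [maxK]
  | succ k ih =>
      show max (maxK a l (k+1)) (a (l+(k+2))) = _
      rw [ih]
      show _ = max (a l) (max (maxK a (l+1) k) (a (l+1+(k+1))))
      rw [max_assoc, show l + (k+2) = l+1+(k+1) from by omega]

lemma le_maxK (a : ℕ → Int) (l k j : ℕ) (h1 : l ≤ j) (h2 : j ≤ l + k) :
    a j ≤ maxK a l k := by
  induction k with
  | zero => have : j = l := by omega
            simp [this, maxK]
  | succ k ih =>
      show a j ≤ max (maxK a l k) (a (l+(k+1)))
      rcases Nat.lt_or_ge j (l+k+1) with h | h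
      · exact le_trans (ih (by omega)) (le_max_left _ _)
      · have : j = l + (k+1) := by omega
        rw [this]; exact le_max_right _ _

lemma maxK_eq_self (a : ℕ → Int) (l k : ℕ) (h : ∀ j, l < j → j ≤ l + k → a j < a l) :
    maxK a l k = a l := by
  induction k with
  | zero => rfl
  | succ k ih =>
      show max (maxK a l k) (a (l+(k+1))) = a l
      rw [ih (fun j hj1 hj2 => h j hj1 (by omega))]
      have := h (l+(k+1)) (by omega) (by omega)
      omega

lemma mSeg_self (a : ℕ → Int) (l : ℕ) : mSeg a l l = a l := by
  simp [mSeg, maxK]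

lemma mSeg_succ (a : ℕ → Int) (l r : ℕ) (h : l ≤ r) :
    mSeg a l (r+1) = max (mSeg a l r) (a (r+1)) := by
  unfold mSeg
  have h1 : r + 1 - l = (r - l) + 1 := by omega
  rw [h1]
  show max (maxK a l (r-l)) (a (l + (r-l+1))) = _
  congr 2
  omega

lemma mSeg_shift (a : ℕ → Int) (l r : ℕ) (h : l < r) :
    mSeg a l r = max (a l) (mSeg a (l+1) r) := by
  unfold mSeg
  have h1 : r - l = (r - (l+1)) + 1 := by omega
  rw [h1, maxK_shift]

lemma le_mSeg (a : ℕ → Int) (l r j : ℕ) (h1 : l ≤ j) (h2 : j ≤ r) :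
    a j ≤ mSeg a l r := by
  exact le_maxK a l (r-l) j h1 (by omega)

lemma mSeg_anti (a : ℕ → Int) (l l' r : ℕ) (h1 : l ≤ l') (h2 : l' ≤ r) :
    mSeg a l' r ≤ mSeg a l r := by
  induction l' with
  | zero => have : l = 0 := by omega
            simp [this]
  | succ l' ih =>
      rcases Nat.lt_or_ge l (l'+1) with h | h
      · have hs := mSeg_shift a l' r (by omega)
        have := ih (by omega) (by omega)
        rw [hs] at this
        omega
      · have : l = l' + 1 := by omega
        simp [this]

lemma badB_widen (a : ℕ → Int) (num : Int) (l l' r : ℕ) (h1 : l ≤ l') (h2 : l' ≤ r)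
    (h : badB a num l' r = true) : badB a num l r = true := by
  unfold badB at h ⊢
  simp only [decide_eq_true_eq] at h ⊢
  have ha := mSeg_anti a l l' r h1 h2
  have hb := mSeg_anti (negf a) l l' r h1 h2
  omega

lemma extGo_ge (a : ℕ → Int) (num : Int) (l : ℕ) : ∀ f r, r ≤ extGo a num l f r := by
  intro f
  induction f with
  | zero => intro r; simp [extGo]
  | succ f ih =>
      intro r
      show r ≤ (if badB a num l r then r else extGo a num l f (r+1))
      split
      · exact le_refl r
      · exact le_trans (by omega) (ih (r+1))

lemma extGo_le (a : ℕ → Int) (num : Int) (l : ℕ) : ∀ f r, extGo a num l f r ≤ r + f := by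
  intro f
  induction f with
  | zero => intro r; simp [extGo]
  | succ f ih =>
      intro r
      show (if badB a num l r then r else extGo a num l f (r+1)) ≤ r + (f+1)
      split
      · omega
      · calc extGo a num l f (r+1) ≤ (r+1) + f := ih (r+1)
          _ ≤ r + (f+1) := by omega

lemma extGo_not_bad (a : ℕ → Int) (num : Int) (l : ℕ) :
    ∀ f r s, r ≤ s → s < extGo a num l f r → badB a num l s = false := by
  intro f
  induction f with
  | zero =>
      intro r s h1 h2
      exact absurd h2 (by simp only [extGo]; omega)
  | succ f ih =>
      intro r s h1 h2
      cases hb : badB a num l r with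
      | true => simp only [extGo, hb, if_true] at h2; omega
      | false =>
        simp only [extGo, hb, Bool.false_eq_true, if_false] at h2
        rcases Nat.eq_or_lt_of_le h1 with h | h
        · subst h; exact hb
        · exact ih (r+1) s (by omega) h2

lemma extGo_restart (a : ℕ → Int) (num : Int) (l : ℕ) :
    ∀ d f r, (∀ s, r ≤ s → s < r + d → badB a num l s = false) →
    extGo a num l (f + d) r = extGo a num l f (r + d) := by
  intro d
  induction d with
  | zero => intro f r _; rfl
  | succ d ih =>
      intro f r h
      have hb : badB a num l r = false := h r (le_refl r) (by omega)
      have h1 : f + (d+1) = (f + d) + 1 := by omega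
      rw [h1]
      show (if badB a num l r then r else extGo a num l (f+d) (r+1)) = _
      rw [hb]
      simp only [Bool.false_eq_true, if_false]
      rw [ih f (r+1) (fun s hs1 hs2 => h s (by omega) (by omega))]
      congr 1
      omega

lemma extA_lb (a : ℕ → Int) (num : Int) (n l : ℕ) (hl : l < n) (hnum : 0 ≤ num) :
    l + 1 ≤ extA a num n l := by
  unfold extA
  have h1 : n - l = (n - l - 1) + 1 := by omega
  rw [h1]
  have hb : badB a num l l = false := by
    unfold badB
    simp only [decide_eq_false_iff_not, not_lt]
    rw [mSeg_self, mSeg_self]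
    simp [negf]
    omega
  show l + 1 ≤ (if badB a num l l then l else extGo a num l (n-l-1) (l+1))
  rw [hb]
  simp only [Bool.false_eq_true, if_false]
  exact extGo_ge a num l _ (l+1)

lemma extA_le (a : ℕ → Int) (num : Int) (n l : ℕ) (hl : l ≤ n) : extA a num n l ≤ n := by
  have := extGo_le a num l (n-l) l
  unfold extA
  omega

lemma dqD_cons (a : ℕ → Int) (l e : ℕ) (h : l < e) :
    dqD a l e = if decide (∀ j, j < e → l < j → a j < a l) = true
      then l :: dqD a (l+1) e else dqD a (l+1) e := by
  unfold dqD
  rw [show e - l = (e - (l+1)) + 1 from by omega, List.range'_succ, List.filter_cons]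

lemma dqD_mem (a : ℕ → Int) (l e x : ℕ) (hx : x ∈ dqD a l e) : l ≤ x ∧ x < e := by
  unfold dqD at hx
  have := List.mem_range'_1.mp (List.mem_of_mem_filter hx)
  omega

lemma dqD_not_cond (a : ℕ → Int) (l e : ℕ)
    (hc : ¬ decide (∀ j, j < e → l < j → a j < a l) = true) :
    ∃ j, j < e ∧ l < j ∧ a l ≤ a j := by
  simp only [decide_eq_true_eq, not_forall, not_lt] at hc
  obtain ⟨j, hj1, hj2, hj3⟩ := hc
  exact ⟨j, hj1, hj2, hj3⟩

lemma dqD_head' (a : ℕ → Int) : ∀ (k l e : ℕ), e - l = k → l < e →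
    a ((dqD a l e).headD 0) = mSeg a l (e-1) := by
  intro k
  induction k using Nat.strong_induction_on with
  | _ k ih =>
    intro l e hk h
    rw [dqD_cons a l e h]
    split
    · next hc =>
      simp only [decide_eq_true_eq] at hc
      show a l = mSeg a l (e-1)
      unfold mSeg
      exact (maxK_eq_self a l (e-1-l) (fun j hj1 hj2 => hc j (by omega) hj1)).symm
    · next hc =>
      obtain ⟨j, hj1, hj2, hj3⟩ := dqD_not_cond a l e hc
      have hlt : l + 1 < e := by omega
      rw [ih (e - (l+1)) (by omega) (l+1) e rfl hlt]
      rw [mSeg_shift a l (e-1) (by omega)]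
      have : a l ≤ mSeg a (l+1) (e-1) :=
        le_trans hj3 (le_mSeg a (l+1) (e-1) j (by omega) (by omega))
      omega

lemma dqD_head (a : ℕ → Int) (l e : ℕ) (h : l < e) :
    a ((dqD a l e).headD 0) = mSeg a l (e-1) :=
  dqD_head' a (e - l) l e rfl h

lemma dqD_popleft (a : ℕ → Int) (l e : ℕ) (h : l < e) :
    (if (dqD a l e).headD 0 = l then (dqD a l e).tail else dqD a l e) = dqD a (l+1) e := by
  rw [dqD_cons a l e h]
  split
  · simp
  · cases hx : dqD a (l+1) e with
    | nil => simp
    | cons x xs =>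
      have hx1 : l + 1 ≤ x := (dqD_mem a (l+1) e x (by rw [hx]; exact List.mem_cons_self)).1
      simp only [List.headD_cons]
      rw [if_neg (by omega)]

lemma dqD_pairwise' (a : ℕ → Int) : ∀ (k l e : ℕ), e - l = k →
    (dqD a l e).Pairwise (fun i j => a j < a i) := by
  intro k
  induction k using Nat.strong_induction_on with
  | _ k ih =>
    intro l e hk
    by_cases h : l < e
    · rw [dqD_cons a l e h]
      split
      · next hc =>
        simp only [decide_eq_true_eq] at hc
        refine List.pairwise_cons.mpr ⟨?_, ih (e - (l+1)) (by omega) (l+1) e rfl⟩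
        intro x hxmem
        have := dqD_mem a (l+1) e x hxmem
        exact hc x (by omega) (by omega)
      · exact ih (e - (l+1)) (by omega) (l+1) e rfl
    · unfold dqD
      rw [show e - l = 0 from by omega]
      simp

lemma dqD_pairwise (a : ℕ → Int) (l e : ℕ) :
    (dqD a l e).Pairwise (fun i j => a j < a i) :=
  dqD_pairwise' a (e - l) l e rfl

lemma popBackWhile_filter (p : ℕ → Bool) :
    ∀ L : List ℕ, L.Pairwise (fun i j => p i = true → p j = true) →
    popBackWhile p L = L.filter (fun i => ! p i) := by
  intro L
  induction L with
  | nil => intro _; rfl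
  | cons x xs ih =>
    intro h
    obtain ⟨h1, h2⟩ := List.pairwise_cons.mp h
    show (match popBackWhile p xs with
          | [] => if p x then [] else [x]
          | y :: ys => x :: y :: ys) = _
    rw [ih h2, List.filter_cons]
    cases hxs : xs.filter (fun i => ! p i) with
    | nil =>
      cases hpx : p x with
      | true => simp
      | false => simp
    | cons y ys =>
      have hy : y ∈ xs.filter (fun i => ! p i) := by rw [hxs]; exact List.mem_cons_self
      have hpy : ¬ p y = true := by
        have := List.of_mem_filter hy
        simpa using this
      have hpx : p x = false := by
        cases hpx : p x with
        | false => rfl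
        | true => exact absurd (h1 y (List.mem_of_mem_filter hy) hpx) hpy
      simp [hpx]

lemma dqD_push (a : ℕ → Int) (l R : ℕ) (h : l ≤ R) :
    dqD a l (R+1) = (dqD a l R).filter (fun i => decide (a R < a i)) ++ [R] := by
  unfold dqD
  rw [List.filter_filter]
  rw [show R + 1 - l = (R - l) + 1 from by omega, List.range'_1_concat,
    show l + (R - l) = R from by omega, List.filter_append]
  congr 1
  · apply List.filter_congr
    intro x hx
    have hxR : x < R := by
      have := List.mem_range'_1.mp hx
      omega
    rw [← Bool.decide_and, decide_eq_decide]
    constructor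
    · intro hall
      exact ⟨hall R (by omega) hxR, fun j hj1 hj2 => hall j (by omega) hj2⟩
    · rintro ⟨hR, hall⟩ j hj1 hj2
      rcases Nat.lt_or_ge j R with hj | hj
      · exact hall j hj hj2
      · rw [show j = R from by omega]
        exact hR
  · apply List.filter_eq_self.mpr
    intro x hx
    rw [List.mem_singleton] at hx
    subst hx
    simp only [decide_eq_true_eq]
    intro j h1 h2
    exact absurd h1 (by omega)

lemma dqD_pairwise_push (a : ℕ → Int) (l e R : ℕ) :
    (dqD a l e).Pairwise (fun i j =>
      (fun i => decide (a i ≤ a R)) i = true → (fun i => decide (a i ≤ a R)) j = true) := by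
  refine (dqD_pairwise a l e).imp ?_
  intro i j hij
  simp only [decide_eq_true_eq]
  omega

lemma not_le_pred (a : ℕ → Int) (R : ℕ) (x : ℕ) :
    (! (fun i => decide (a i ≤ a R)) x) = decide (a R < a x) := by
  simp [← decide_not, not_le]

lemma push_eqn1 (a : ℕ → Int) (l R : ℕ) (h : l ≤ R) :
    popBackWhile (fun i => decide (a i ≤ a R)) (dqD a l R) ++ [R] = dqD a l (R+1) := by
  rw [popBackWhile_filter _ _ (dqD_pairwise_push a l R R),
    List.filter_congr (fun x _ => not_le_pred a R x), ← dqD_push a l R h]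

lemma push_eqn2 (a : ℕ → Int) (l R : ℕ) (h : l ≤ R) :
    popBackWhile (fun i => decide (a i ≤ a R)) (dqD a l (R+1)) ++ [R] = dqD a l (R+1) := by
  have hq : List.filter (fun i => decide (a R < a i)) (dqD a l (R+1))
      = List.filter (fun i => decide (a R < a i)) (dqD a l R) := by
    rw [dqD_push a l R h, List.filter_append, List.filter_filter]
    have h1 : List.filter (fun i => decide (a R < a i)) [R] = [] := by simp
    rw [h1, List.append_nil]
    exact List.filter_congr (fun x _ => by rw [Bool.and_self])
  rw [popBackWhile_filter _ _ (dqD_pairwise_push a l (R+1) R),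
    List.filter_congr (fun x _ => not_le_pred a R x), hq, ← dqD_push a l R h]

lemma innerA_spec (arr : List Int) (num : Int) (l : ℕ) :
    ∀ f R maxw minw, R + f = arr.length → l ≤ R →
    ((maxw = dqD (aget arr) l R ∧ minw = dqD (negf (aget arr)) l R) ∨
      (R < arr.length ∧ maxw = dqD (aget arr) l (R+1) ∧ minw = dqD (negf (aget arr)) l (R+1))) →
    innerA arr num arr.length f R maxw minw =
      (extGo (aget arr) num l f R,
       dqD (aget arr) l (min (extGo (aget arr) num l f R + 1) arr.length),
       dqD (negf (aget arr)) l (min (extGo (aget arr) num l f R + 1) arr.length)) := by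
  intro f
  induction f with
  | zero =>
    intro R maxw minw hRf hlR hd
    have hR : R = arr.length := by omega
    rcases hd with ⟨hm1, hm2⟩ | ⟨hlt, _, _⟩
    · show (R, maxw, minw) = _
      rw [hm1, hm2]
      simp only [extGo]
      rw [show min (R+1) arr.length = arr.length from by omega, ← hR]
    · omega
  | succ f ih =>
    intro R maxw minw hRf hlR hd
    have hRn : R < arr.length := by omega
    have hbody : innerA arr num arr.length (f+1) R maxw minw =
        (if aget arr ((popBackWhile (fun i => decide (aget arr i ≤ aget arr R)) maxw ++ [R]).headD 0) -
            aget arr ((popBackWhile (fun i => decide (aget arr i ≥ aget arr R)) minw ++ [R]).headD 0) > num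
         then (R, popBackWhile (fun i => decide (aget arr i ≤ aget arr R)) maxw ++ [R],
                  popBackWhile (fun i => decide (aget arr i ≥ aget arr R)) minw ++ [R])
         else innerA arr num arr.length f (R+1)
            (popBackWhile (fun i => decide (aget arr i ≤ aget arr R)) maxw ++ [R])
            (popBackWhile (fun i => decide (aget arr i ≥ aget arr R)) minw ++ [R])) := by
      show (if R < arr.length then _ else _) = _
      rw [if_pos hRn]
    rw [hbody]
    have hpredmin : (fun i => decide (aget arr i ≥ aget arr R))
        = (fun i => decide (negf (aget arr) i ≤ negf (aget arr) R)) := by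
      funext i
      simp [negf, ge_iff_le]
    have hmax : popBackWhile (fun i => decide (aget arr i ≤ aget arr R)) maxw ++ [R]
        = dqD (aget arr) l (R+1) := by
      rcases hd with ⟨hm1, _⟩ | ⟨_, hm1, _⟩
      · rw [hm1]; exact push_eqn1 (aget arr) l R hlR
      · rw [hm1]; exact push_eqn2 (aget arr) l R hlR
    have hmin : popBackWhile (fun i => decide (aget arr i ≥ aget arr R)) minw ++ [R]
        = dqD (negf (aget arr)) l (R+1) := by
      rw [hpredmin]
      rcases hd with ⟨_, hm2⟩ | ⟨_, _, hm2⟩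
      · rw [hm2]; exact push_eqn1 (negf (aget arr)) l R hlR
      · rw [hm2]; exact push_eqn2 (negf (aget arr)) l R hlR
    have hA : aget arr ((dqD (aget arr) l (R+1)).headD 0) = mSeg (aget arr) l R := by
      have := dqD_head (aget arr) l (R+1) (by omega)
      rwa [show R + 1 - 1 = R from rfl] at this
    have hB : aget arr ((dqD (negf (aget arr)) l (R+1)).headD 0)
        = -(mSeg (negf (aget arr)) l R) := by
      have := dqD_head (negf (aget arr)) l (R+1) (by omega)
      rw [show R + 1 - 1 = R from rfl] at this
      simp only [negf] at this
      omega
    rw [hmax, hmin, hA, hB]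
    cases hb : badB (aget arr) num l R with
    | true =>
      simp only [badB, decide_eq_true_eq] at hb
      rw [if_pos (by omega)]
      have hgo : extGo (aget arr) num l (f+1) R = R := by
        simp only [extGo, badB, decide_eq_true_eq]
        rw [if_pos (by omega)]
      rw [hgo, show min (R+1) arr.length = R + 1 from by omega]
    | false =>
      have hbn : ¬ mSeg (aget arr) l R + mSeg (negf (aget arr)) l R > num := by
        simpa [badB] using hb
      rw [if_neg (by omega)]
      have hgo : extGo (aget arr) num l (f+1) R = extGo (aget arr) num l f (R+1) := by
        simp only [extGo, hb, Bool.false_eq_true, if_false]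
      rw [hgo]
      exact ih (R+1) _ _ (by omega) (by omega) (Or.inl ⟨rfl, rfl⟩)

lemma extB_spec (arr : List Int) (num : Int) (l : ℕ) :
    ∀ f r lo hi, r + f = arr.length →
    ((r = l ∧ lo = aget arr l ∧ hi = aget arr l) ∨
      (l < r ∧ lo = -(mSeg (negf (aget arr)) l (r-1)) ∧ hi = mSeg (aget arr) l (r-1))) →
    extB arr num arr.length f r lo hi = extGo (aget arr) num l f r := by
  intro f
  induction f with
  | zero => intro r lo hi _ _; rfl
  | succ f ih =>
    intro r lo hi hrf hd
    have hrn : r < arr.length := by omega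
    have hbody : extB arr num arr.length (f+1) r lo hi =
        (if (if aget arr r > hi then aget arr r else hi) -
            (if aget arr r < lo then aget arr r else lo) > num then r
         else extB arr num arr.length f (r+1)
            (if aget arr r < lo then aget arr r else lo)
            (if aget arr r > hi then aget arr r else hi)) := by
      show (if r < arr.length then _ else _) = _
      rw [if_pos hrn]
    rw [hbody]
    have hlo : (if aget arr r < lo then aget arr r else lo)
        = -(mSeg (negf (aget arr)) l r) := by
      rcases hd with ⟨hrl, hlo, _⟩ | ⟨hlr, hlo, _⟩
      · subst hrl
        rw [hlo, mSeg_self]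
        unfold negf
        split <;> omega
      · rw [hlo, show r = (r-1)+1 from by omega,
          mSeg_succ (negf (aget arr)) l (r-1) (by omega),
          show r - 1 + 1 = r from by omega]
        rcases max_cases (mSeg (negf (aget arr)) l (r-1)) (negf (aget arr) r) with
          ⟨h1, h2⟩ | ⟨h1, h2⟩ <;>
        · rw [h1]
          unfold negf at *
          split <;> omega
    have hhi : (if aget arr r > hi then aget arr r else hi) = mSeg (aget arr) l r := by
      rcases hd with ⟨hrl, _, hhi⟩ | ⟨hlr, _, hhi⟩
      · subst hrl
        rw [hhi, mSeg_self]
        split <;> omega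
      · rw [hhi, show r = (r-1)+1 from by omega,
          mSeg_succ (aget arr) l (r-1) (by omega),
          show r - 1 + 1 = r from by omega]
        rcases max_cases (mSeg (aget arr) l (r-1)) (aget arr r) with
          ⟨h1, h2⟩ | ⟨h1, h2⟩ <;>
        · rw [h1]
          split <;> omega
    rw [hlo, hhi]
    cases hb : badB (aget arr) num l r with
    | true =>
      simp only [badB, decide_eq_true_eq] at hb
      rw [if_pos (by omega)]
      simp only [extGo, badB, decide_eq_true_eq]
      rw [if_pos (by omega)]
    | false =>
      have hbn : ¬ mSeg (aget arr) l r + mSeg (negf (aget arr)) l r > num := by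
        simpa [badB] using hb
      rw [if_neg (by omega)]
      have hgo : extGo (aget arr) num l (f+1) r = extGo (aget arr) num l f (r+1) := by
        simp only [extGo, hb, Bool.false_eq_true, if_false]
      rw [hgo]
      exact ih (r+1) _ _ (by omega)
        (Or.inr ⟨by omega, by rw [show r + 1 - 1 = r from rfl], by rw [show r + 1 - 1 = r from rfl]⟩)

-- running total after the first ℓ outer iterations (both programs)
def ansSum (a : ℕ → Int) (num : Int) (n ℓ : ℕ) : Int :=
  (List.range ℓ).foldl (fun t l => t + ((extA a num n l : Int) - (l : Int))) 0

lemma foldl_add_congr (t1 t2 : ℕ → Int) :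
    ∀ (L : List ℕ) (s : Int), (∀ l ∈ L, t1 l = t2 l) →
    L.foldl (fun t l => t + t1 l) s = L.foldl (fun t l => t + t2 l) s := by
  intro L
  induction L with
  | nil => intro s _; rfl
  | cons x xs ih =>
    intro s h
    show xs.foldl _ (s + t1 x) = xs.foldl _ (s + t2 x)
    rw [h x (List.mem_cons_self), ih _ (fun l hl => h l (List.mem_cons_of_mem x hl))]

lemma foldl_add_zero (t1 : ℕ → Int) :
    ∀ (L : List ℕ) (s : Int), (∀ l ∈ L, t1 l = 0) →
    L.foldl (fun t l => t + t1 l) s = s := by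
  intro L
  induction L with
  | nil => intro s _; rfl
  | cons x xs ih =>
    intro s h
    show xs.foldl _ (s + t1 x) = s
    rw [h x (List.mem_cons_self), add_zero, ih _ (fun l hl => h l (List.mem_cons_of_mem x hl))]

lemma ansSum_succ (a : ℕ → Int) (num : Int) (n ℓ : ℕ) :
    ansSum a num n (ℓ+1) = ansSum a num n ℓ + ((extA a num n ℓ : Int) - (ℓ : Int)) := by
  unfold ansSum
  rw [List.range_succ, List.foldl_append]
  rfl

-- R at the start of outer iteration ℓ
def EA (a : ℕ → Int) (num : Int) (n ℓ : ℕ) : ℕ := if ℓ = 0 then 0 else extA a num n (ℓ-1)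
-- deque coverage endpoint (exclusive) at the start of outer iteration ℓ
def CovA (a : ℕ → Int) (num : Int) (n ℓ : ℕ) : ℕ :=
  if ℓ = 0 then 0 else min (extA a num n (ℓ-1) + 1) n

lemma outerA (arr : List Int) (num : Int) (hnum : 0 ≤ num) :
    ∀ k ℓ, ℓ + k = arr.length →
    ((List.range' ℓ k).foldl (stepA arr num arr.length)
        (EA (aget arr) num arr.length ℓ, ansSum (aget arr) num arr.length ℓ,
         dqD (aget arr) ℓ (CovA (aget arr) num arr.length ℓ),
         dqD (negf (aget arr)) ℓ (CovA (aget arr) num arr.length ℓ))).2.1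
      = ansSum (aget arr) num arr.length arr.length := by
  intro k
  induction k with
  | zero =>
    intro ℓ h
    rw [List.range'_zero, List.foldl_nil, show ℓ = arr.length from by omega]
  | succ k ih =>
    intro ℓ h
    have hln : ℓ < arr.length := by omega
    have hR0l : ℓ ≤ EA (aget arr) num arr.length ℓ := by
      unfold EA
      split
      · omega
      · next h0 =>
        have := extA_lb (aget arr) num arr.length (ℓ-1) (by omega) hnum
        omega
    have hR0n : EA (aget arr) num arr.length ℓ ≤ arr.length := by
      unfold EA
      split
      · omega
      · exact extA_le (aget arr) num arr.length (ℓ-1) (by omega)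
    have hgoods : ∀ s, ℓ ≤ s → s < EA (aget arr) num arr.length ℓ →
        badB (aget arr) num ℓ s = false := by
      intro s hs1 hs2
      unfold EA at hs2
      by_cases h0 : ℓ = 0
      · rw [if_pos h0] at hs2; omega
      · rw [if_neg h0] at hs2
        have hb1 : badB (aget arr) num (ℓ-1) s = false :=
          extGo_not_bad (aget arr) num (ℓ-1) _ (ℓ-1) s (by omega) hs2
        cases hb : badB (aget arr) num ℓ s with
        | false => rfl
        | true =>
          rw [badB_widen (aget arr) num (ℓ-1) ℓ s (by omega) hs1 hb] at hb1
          exact hb1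
    have hdisj : (dqD (aget arr) ℓ (CovA (aget arr) num arr.length ℓ)
          = dqD (aget arr) ℓ (EA (aget arr) num arr.length ℓ) ∧
        dqD (negf (aget arr)) ℓ (CovA (aget arr) num arr.length ℓ)
          = dqD (negf (aget arr)) ℓ (EA (aget arr) num arr.length ℓ)) ∨
        (EA (aget arr) num arr.length ℓ < arr.length ∧
         dqD (aget arr) ℓ (CovA (aget arr) num arr.length ℓ)
          = dqD (aget arr) ℓ (EA (aget arr) num arr.length ℓ + 1) ∧
         dqD (negf (aget arr)) ℓ (CovA (aget arr) num arr.length ℓ)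
          = dqD (negf (aget arr)) ℓ (EA (aget arr) num arr.length ℓ + 1)) := by
      unfold EA CovA
      by_cases h0 : ℓ = 0
      · left
        rw [if_pos h0, if_pos h0]
        exact ⟨rfl, rfl⟩
      · rw [if_neg h0, if_neg h0]
        rcases Nat.lt_or_ge (extA (aget arr) num arr.length (ℓ-1)) arr.length with hc | hc
        · right
          rw [show min (extA (aget arr) num arr.length (ℓ-1) + 1) arr.length
              = extA (aget arr) num arr.length (ℓ-1) + 1 from by omega]
          exact ⟨hc, rfl, rfl⟩
        · left
          have he : extA (aget arr) num arr.length (ℓ-1) = arr.length := by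
            have := extA_le (aget arr) num arr.length (ℓ-1) (by omega)
            omega
          rw [he, show min (arr.length + 1) arr.length = arr.length from by omega]
          exact ⟨rfl, rfl⟩
    have ht := innerA_spec arr num ℓ (arr.length - EA (aget arr) num arr.length ℓ)
      (EA (aget arr) num arr.length ℓ)
      (dqD (aget arr) ℓ (CovA (aget arr) num arr.length ℓ))
      (dqD (negf (aget arr)) ℓ (CovA (aget arr) num arr.length ℓ))
      (by omega) hR0l hdisj
    have hrestart : extGo (aget arr) num ℓ (arr.length - EA (aget arr) num arr.length ℓ)
        (EA (aget arr) num arr.length ℓ) = extA (aget arr) num arr.length ℓ := by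
      have hre := extGo_restart (aget arr) num ℓ (EA (aget arr) num arr.length ℓ - ℓ)
        (arr.length - EA (aget arr) num arr.length ℓ) ℓ
        (fun s hs1 hs2 => hgoods s hs1 (by omega))
      unfold extA
      rw [show arr.length - ℓ
          = (arr.length - EA (aget arr) num arr.length ℓ) + (EA (aget arr) num arr.length ℓ - ℓ)
          from by omega]
      rw [hre, show ℓ + (EA (aget arr) num arr.length ℓ - ℓ) = EA (aget arr) num arr.length ℓ
          from by omega]
    rw [hrestart] at ht
    have hextlb : ℓ + 1 ≤ extA (aget arr) num arr.length ℓ :=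
      extA_lb (aget arr) num arr.length ℓ hln hnum
    have hE : ℓ < min (extA (aget arr) num arr.length ℓ + 1) arr.length := by omega
    have hstep : stepA arr num arr.length
        (EA (aget arr) num arr.length ℓ, ansSum (aget arr) num arr.length ℓ,
         dqD (aget arr) ℓ (CovA (aget arr) num arr.length ℓ),
         dqD (negf (aget arr)) ℓ (CovA (aget arr) num arr.length ℓ)) ℓ
        = (EA (aget arr) num arr.length (ℓ+1), ansSum (aget arr) num arr.length (ℓ+1),
           dqD (aget arr) (ℓ+1) (CovA (aget arr) num arr.length (ℓ+1)),
           dqD (negf (aget arr)) (ℓ+1) (CovA (aget arr) num arr.length (ℓ+1))) := by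
      simp only [stepA]
      rw [ht]
      rw [dqD_popleft (aget arr) ℓ _ hE, dqD_popleft (negf (aget arr)) ℓ _ hE]
      rw [show EA (aget arr) num arr.length (ℓ+1) = extA (aget arr) num arr.length ℓ from rfl,
        show CovA (aget arr) num arr.length (ℓ+1)
          = min (extA (aget arr) num arr.length ℓ + 1) arr.length from rfl,
        ansSum_succ]
    rw [List.range'_succ, List.foldl_cons, hstep]
    exact ih (ℓ+1) (by omega)

-- ===== VERDICT (by name: the statement is the Claim_ definition above) =====
lemma main_eq (arr : List Int) (num : Int) : sub_arr_num arr num = sub_arr_num_alt arr num := by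
  by_cases hnil : arr = []
  · subst hnil
    rfl
  rcases Int.lt_or_le num 0 with hneg | hpos
  · unfold sub_arr_num
    rw [if_pos (Or.inr hneg)]
    unfold sub_arr_num_alt
    refine (foldl_add_zero _ _ _ ?_).symm
    intro l hl
    have hln : l < arr.length := List.mem_range.mp hl
    rw [show arr.length - l = (arr.length - l - 1) + 1 from by omega]
    have hB : extB arr num arr.length ((arr.length - l - 1)+1) l (aget arr l) (aget arr l)
        = l := by
      show (if l < arr.length then _ else _) = _
      rw [if_pos hln]
      show (if (if aget arr l > aget arr l then aget arr l else aget arr l) -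
              (if aget arr l < aget arr l then aget arr l else aget arr l) > num then l
            else extB arr num arr.length (arr.length - l - 1) (l+1)
              (if aget arr l < aget arr l then aget arr l else aget arr l)
              (if aget arr l > aget arr l then aget arr l else aget arr l)) = l
      rw [if_neg (lt_irrefl _), if_pos (by omega)]
    rw [hB]
    omega
  · unfold sub_arr_num
    rw [if_neg (not_or.mpr ⟨hnil, by omega⟩)]
    rw [List.range_eq_range']
    have h0 := outerA arr num hpos arr.length 0 (by omega)
    refine Eq.trans (by exact h0) ?_
    unfold ansSum sub_arr_num_alt
    refine foldl_add_congr _ _ _ _ ?_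
    intro l hl
    have hln : l < arr.length := List.mem_range.mp hl
    have he : extB arr num arr.length (arr.length - l) l (aget arr l) (aget arr l)
        = extA (aget arr) num arr.length l :=
      extB_spec arr num l (arr.length - l) l (aget arr l) (aget arr l) (by omega)
        (Or.inl ⟨rfl, rfl, rfl⟩)
    rw [he]

theorem sub_arr_num_spec : Claim_equal_sub_arr_num := by
  unfold Claim_equal_sub_arr_num
  intro arr num _
  unfold Spec_sub_arr_num
  exact main_eq arr num
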